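-- pv_equiv track=rewrite | github.com/DStheG/LeetCode | 1589-maximum-sum-obtained-of-any-permutation/solution.py | maxSumRangeQuery1
-- ===== SOURCE A (Python) =====
-- def maxSumRangeQuery1(nums: list[int], requests: list[list[int]]) -> int:
--     hist = [0] * 100000
--     for r in requests:
--         for i in range(r[0], r[1]+1):
--             hist[i] += 1
--     hist = list(filter(lambda x: x > 0, hist))
--
--     nums.sort(reverse=True)
--     hist.sort(reverse=True)
--
--     ret = 0
--     for i, h in enumerate(hist):
--         ret += nums[i] * h
--     return ret % (10**9 + 7)
-- ===== SOURCE B (Python) =====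
-- def maxSumRangeQuery1(nums: list[int], requests: list[list[int]]) -> int:
--     N = 100000
--     # difference array: coverage counts in O(N + Q) instead of walking every range
--     diff = [0] * (N + 1)
--     for r in requests:
--         l, rr = r[0], r[1]
--         if l <= rr:
--             diff[l] += 1
--             diff[rr + 1] -= 1
--     hist = []
--     c = 0
--     for d in diff[:N]:
--         c += d
--         if c > 0:
--             hist.append(c)
--     hist.sort(reverse=True)
--     nums_sorted = sorted(nums, reverse=True)
--     return sum(nums_sorted[i] * h for i, h in enumerate(hist)) % (10**9 + 7)
-- ===== Notes on version B (the rewrite author's own statement) =====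
-- stated objective: alternative
-- what changed: Coverage counts are computed with a difference array plus one running prefix-sum pass (O(n+Q) updates) instead of incrementing every index of every request range (O(sum of range lengths)); overall runtime is dominated by the sorts either way.
-- outside the precondition, e.g. on maxSumRangeQuery1([1], [[-1, -1]]): A returns 1, B returns 0
import Mathlib
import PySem

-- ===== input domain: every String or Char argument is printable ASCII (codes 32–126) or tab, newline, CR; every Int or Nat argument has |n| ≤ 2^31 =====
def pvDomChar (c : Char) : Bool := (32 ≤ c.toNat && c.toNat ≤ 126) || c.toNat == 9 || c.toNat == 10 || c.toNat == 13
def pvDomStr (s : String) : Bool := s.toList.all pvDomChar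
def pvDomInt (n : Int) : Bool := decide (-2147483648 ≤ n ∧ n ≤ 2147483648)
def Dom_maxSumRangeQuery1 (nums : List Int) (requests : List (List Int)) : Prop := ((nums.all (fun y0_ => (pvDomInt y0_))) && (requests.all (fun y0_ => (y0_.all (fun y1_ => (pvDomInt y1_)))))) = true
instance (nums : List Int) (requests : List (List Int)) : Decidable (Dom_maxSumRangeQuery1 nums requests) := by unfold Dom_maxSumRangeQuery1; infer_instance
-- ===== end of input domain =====

-- B replaces A's per-index increments over every request range by a difference array and one
-- running prefix-sum pass (objective: alternative algorithm, same measured cost — the sorts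
-- dominate). Return-value equivalence only: A sorts `nums` in place, B does not mutate it.


-- ===== PORT A =====
-- r[0] / r[1] (Pre_ guarantees the request has ≥ 2 entries, where Python would raise)
def pvG0 (r : List Int) : Int := PySem.List.pyGetD r 0 0
def pvG1 (r : List Int) : Int := PySem.List.pyGetD r 1 0
-- hist[i] += 1 (exact on the in-range indices Pre_ admits)
def pvIncAt (h : List Int) (i : Int) : List Int :=
  PySem.List.pySetD h i (PySem.List.pyGetD h i 0 + 1)
-- the body of A's outer loop: 'for i in range(r[0], r[1]+1): hist[i] += 1'
def pvAStep (h : List Int) (r : List Int) : List Int :=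
  (PySem.List.pyRange (pvG0 r) (pvG1 r + 1) 1).foldl pvIncAt h

-- literal transliteration of A
def maxSumRangeQuery1 (nums : List Int) (requests : List (List Int)) : Int :=
  let hist := requests.foldl pvAStep (List.replicate 100000 (0 : Int))
  let hist2 := hist.filter (fun x => decide (0 < x))
  let nums2 := PySem.List.sorted nums (fun x => x) true
  let hist3 := PySem.List.sorted hist2 (fun x => x) true
  let ret := (PySem.List.enumerate hist3 0).foldl
      (fun ret p => ret + PySem.List.pyGetD nums2 p.1 0 * p.2) 0
  PySem.Int.mod ret (10 ^ 9 + 7)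

-- ===== PORT B =====
-- the body of B's first loop: 'if l <= rr: diff[l] += 1; diff[rr+1] -= 1'
def pvBStep (d : List Int) (r : List Int) : List Int :=
  if pvG0 r ≤ pvG1 r then
    let d1 := PySem.List.pySetD d (pvG0 r) (PySem.List.pyGetD d (pvG0 r) 0 + 1)
    PySem.List.pySetD d1 (pvG1 r + 1) (PySem.List.pyGetD d1 (pvG1 r + 1) 0 - 1)
  else d
-- the body of B's second loop: 'c += d; if c > 0: hist.append(c)'
def pvScanStep (p : Int × List Int) (x : Int) : Int × List Int :=
  let c := p.1 + x
  (c, if 0 < c then p.2 ++ [c] else p.2)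

-- literal transliteration of B (Source B)
def maxSumRangeQuery1_alt (nums : List Int) (requests : List (List Int)) : Int :=
  let diff := requests.foldl pvBStep (List.replicate 100001 (0 : Int))
  let p := (PySem.List.slice diff none (some 100000)).foldl pvScanStep ((0 : Int), ([] : List Int))
  let hist := PySem.List.sorted p.2 (fun x => x) true
  let snums := PySem.List.sorted nums (fun x => x) true
  PySem.Int.mod ((PySem.List.enumerate hist 0).foldl
      (fun ret q => ret + PySem.List.pyGetD snums q.1 0 * q.2) 0) (10 ^ 9 + 7)

-- ===== PRECONDITION & SPEC =====
-- Pre_ excludes exactly the inputs A does not handle on the natural domain of index ranges: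
-- a request with fewer than 2 entries (IndexError), a nonempty request range reaching outside
-- [0, 100000) (IndexError above 99999; a negative start is outside the natural domain — A's
-- negative-index wraparound there is accidental), and request sets covering more distinct
-- indices than nums has elements (IndexError on nums[i]).
def Pre_maxSumRangeQuery1 (nums : List Int) (requests : List (List Int)) : Prop :=
  (∀ r ∈ requests, 2 ≤ r.length ∧ (pvG0 r ≤ pvG1 r → 0 ≤ pvG0 r ∧ pvG1 r < 100000)) ∧
  (requests.flatMap (fun r => PySem.List.pyRange (pvG0 r) (pvG1 r + 1) 1)).dedup.length ≤ nums.length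

instance (nums : List Int) (requests : List (List Int)) : Decidable (Pre_maxSumRangeQuery1 nums requests) := by
  unfold Pre_maxSumRangeQuery1; infer_instance

def pvWitness_maxSumRangeQuery1 : List Int × List (List Int) := ([3, 1, 2], [[0, 1]])

def Spec_maxSumRangeQuery1 (nums : List Int) (requests : List (List Int)) (out : Int) : Prop := out = maxSumRangeQuery1_alt nums requests
instance (nums : List Int) (requests : List (List Int)) (out : Int) : Decidable (Spec_maxSumRangeQuery1 nums requests out) := by unfold Spec_maxSumRangeQuery1; infer_instance

-- ===== CLAIM (what is proved, stated in full; the proofs are below) =====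
def Claim_equal_maxSumRangeQuery1 : Prop := ∀ (nums : List Int) (requests : List (List Int)), Dom_maxSumRangeQuery1 nums requests → Pre_maxSumRangeQuery1 nums requests → Spec_maxSumRangeQuery1 nums requests (maxSumRangeQuery1 nums requests)

-- ===== LEMMAS AND PROOFS =====

-- coverage count of index i by the requests
def pvCnt (rs : List (List Int)) (i : Int) : Int :=
  (rs.countP (fun r => decide (pvG0 r ≤ i ∧ i ≤ pvG1 r)) : Int)
-- contribution of one request to the difference array at position j
def pvDelta (r : List Int) (j : Int) : Int :=
  if pvG0 r ≤ pvG1 r then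
    (if j = pvG0 r then 1 else 0) - (if j = pvG1 r + 1 then 1 else 0)
  else 0
def pvDlt (rs : List (List Int)) (j : Int) : Int := (rs.map (fun r => pvDelta r j)).sum
-- running prefix sums of a list, starting from c
def pvPrefixes (c : Int) : List Int → List Int
  | [] => []
  | d :: ds => (c + d) :: pvPrefixes (c + d) ds

lemma pvGetD_set (l : List Int) (i j : Nat) (v d : Int) (hj : j < l.length) :
    (l.set i v).getD j d = if i = j then v else l.getD j d := by
  rcases eq_or_ne i j with rfl | h
  · simp [List.getD_eq_getElem?_getD, hj]
  · simp [List.getD_eq_getElem?_getD, List.getElem?_set_ne, h]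

lemma pvGetD_take (l : List Int) (n j : Nat) (d : Int) (h : j < n) :
    (l.take n).getD j d = l.getD j d := by
  simp [List.getD_eq_getElem?_getD, h]

lemma pvCnt_cons (r : List Int) (rs : List (List Int)) (i : Int) :
    pvCnt (r :: rs) i = pvCnt rs i + (if pvG0 r ≤ i ∧ i ≤ pvG1 r then 1 else 0) := by
  unfold pvCnt
  rw [List.countP_cons]
  by_cases hc : pvG0 r ≤ i ∧ i ≤ pvG1 r
  · simp [hc]
  · simp [hc]

lemma pvInnerA_spec (n : Nat) : ∀ (l rr : Int), (rr + 1 - l).toNat = n →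
    (l ≤ rr → 0 ≤ l ∧ rr < 100000) → ∀ h : List Int, h.length = 100000 →
    ((PySem.List.pyRange l (rr + 1) 1).foldl pvIncAt h).length = 100000 ∧
    ∀ j : Nat, j < 100000 →
      ((PySem.List.pyRange l (rr + 1) 1).foldl pvIncAt h).getD j 0
        = h.getD j 0 + (if l ≤ (j : Int) ∧ (j : Int) ≤ rr then 1 else 0) := by
  induction n with
  | zero =>
    intro l rr hn hb h hh
    rw [PySem.List.pyRange_one_eq_nil (by omega)]
    refine ⟨hh, fun j hj => ?_⟩
    rw [if_neg (by omega)]; simp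
  | succ n ih =>
    intro l rr hn hb h hh
    have hlr : l ≤ rr := by omega
    obtain ⟨hl0, hlt⟩ := hb hlr
    rw [PySem.List.pyRange_one_cons (by omega)]
    simp only [List.foldl_cons]
    have hlcast : ((l.toNat : Nat) : Int) = l := Int.toNat_of_nonneg hl0
    have hstep : pvIncAt h l = h.set l.toNat (h.getD l.toNat 0 + 1) := by
      unfold pvIncAt
      rw [← hlcast, PySem.List.pySetD_natCast, PySem.List.pyGetD_natCast, Int.toNat_natCast]
    rw [hstep]
    have hh' : (h.set l.toNat (h.getD l.toNat 0 + 1)).length = 100000 := by simp [hh]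
    obtain ⟨hlen, hget⟩ := ih (l + 1) rr (by omega) (fun _ => ⟨by omega, hlt⟩) _ hh'
    refine ⟨hlen, fun j hj => ?_⟩
    rw [hget j hj, pvGetD_set _ _ _ _ _ (by omega)]
    rcases eq_or_ne l.toNat j with rfl | hne
    · rw [if_pos rfl, if_neg (by omega), if_pos (by constructor <;> omega)]; ring
    · rw [if_neg hne]
      have : ¬ ((j : Int) = l) := by omega
      by_cases hc : l + 1 ≤ (j : Int) ∧ (j : Int) ≤ rr
      · rw [if_pos hc, if_pos ⟨by omega, hc.2⟩]
      · rw [if_neg hc, if_neg (by omega)]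

lemma pvFoldA_spec (rs : List (List Int))
    (hpre : ∀ r ∈ rs, pvG0 r ≤ pvG1 r → 0 ≤ pvG0 r ∧ pvG1 r < 100000) :
    ∀ h : List Int, h.length = 100000 →
    (rs.foldl pvAStep h).length = 100000 ∧
    ∀ j : Nat, j < 100000 → (rs.foldl pvAStep h).getD j 0 = h.getD j 0 + pvCnt rs (j : Int) := by
  induction rs with
  | nil => intro h hh; refine ⟨hh, fun j hj => ?_⟩; simp [pvCnt]
  | cons r t ih =>
    intro h hh
    simp only [List.foldl_cons]
    obtain ⟨hlen1, hget1⟩ := pvInnerA_spec (pvG1 r + 1 - pvG0 r).toNat (pvG0 r) (pvG1 r) rfl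
      (hpre r (by simp)) h hh
    obtain ⟨hlen, hget⟩ := ih (fun r' hr' => hpre r' (by simp [hr'])) (pvAStep h r) hlen1
    refine ⟨hlen, fun j hj => ?_⟩
    rw [hget j hj, pvAStep, hget1 j hj, pvCnt_cons]
    ring

lemma pvFoldB_spec (rs : List (List Int))
    (hpre : ∀ r ∈ rs, pvG0 r ≤ pvG1 r → 0 ≤ pvG0 r ∧ pvG1 r < 100000) :
    ∀ d : List Int, d.length = 100001 →
    (rs.foldl pvBStep d).length = 100001 ∧
    ∀ j : Nat, j < 100001 → (rs.foldl pvBStep d).getD j 0 = d.getD j 0 + pvDlt rs (j : Int) := by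
  induction rs with
  | nil => intro d hd; refine ⟨hd, fun j hj => ?_⟩; simp [pvDlt]
  | cons r t ih =>
    intro d hd
    simp only [List.foldl_cons]
    have hstep : (pvBStep d r).length = 100001 ∧
        ∀ j : Nat, j < 100001 → (pvBStep d r).getD j 0 = d.getD j 0 + pvDelta r (j : Int) := by
      by_cases hle : pvG0 r ≤ pvG1 r
      · obtain ⟨hl0, hlt⟩ := hpre r (by simp) hle
        have hc0 : ((pvG0 r).toNat : Int) = pvG0 r := Int.toNat_of_nonneg hl0
        have hc1 : (((pvG1 r + 1).toNat : Nat) : Int) = pvG1 r + 1 := Int.toNat_of_nonneg (by omega)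
        unfold pvBStep
        rw [if_pos hle]
        simp only
        rw [← hc0, ← hc1, PySem.List.pySetD_natCast, PySem.List.pyGetD_natCast,
          PySem.List.pySetD_natCast, PySem.List.pyGetD_natCast]
        refine ⟨by simp [hd], fun j hj => ?_⟩
        rw [pvGetD_set _ _ _ _ _ (by simp; omega), pvGetD_set _ _ _ _ _ (by omega),
          pvGetD_set _ _ _ _ _ (by omega)]
        unfold pvDelta
        rw [if_pos hle]
        have hne : (pvG0 r).toNat ≠ (pvG1 r + 1).toNat := by omega
        rcases eq_or_ne ((pvG1 r + 1).toNat) j with rfl | h1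
        · rw [if_neg hne, if_pos (by omega), if_neg (by omega), if_pos (by omega)]
          ring
        · rw [if_neg h1]
          rcases eq_or_ne ((pvG0 r).toNat) j with rfl | h0
          · rw [if_pos rfl, if_pos (by omega), if_neg (by omega)]; ring
          · rw [if_neg h0, if_neg (by omega), if_neg (by omega)]; ring
      · simp only [pvBStep, pvDelta, hle, if_false]
        exact ⟨hd, fun j hj => by ring⟩
    obtain ⟨hlen1, hget1⟩ := hstep
    obtain ⟨hlen, hget⟩ := ih (fun r' hr' => hpre r' (by simp [hr'])) (pvBStep d r) hlen1
    refine ⟨hlen, fun j hj => ?_⟩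
    rw [hget j hj, hget1 j hj]
    simp only [pvDlt, List.map_cons, List.sum_cons]
    ring

lemma pvSum_map_sub (l : List Nat) (f g : Nat → Int) :
    (l.map (fun x => f x - g x)).sum = (l.map f).sum - (l.map g).sum := by
  induction l with
  | nil => simp
  | cons a t ih => simp [ih]; ring

lemma pvSum_ind (m : Nat) (a : Int) :
    ((List.range m).map (fun t : Nat => if (t : Int) = a then (1 : Int) else 0)).sum
      = if 0 ≤ a ∧ a < (m : Int) then 1 else 0 := by
  induction m with
  | zero => rw [if_neg (by omega)]; simp
  | succ n ih =>
    by_cases hc : (n : Int) = a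
    · simp only [List.range_succ, List.map_append, List.sum_append, ih]
      rw [if_neg (by omega), if_pos (by push_cast; omega)]; simp [hc]
    · simp only [List.range_succ, List.map_append, List.sum_append, ih]
      have h2 : (0 ≤ a ∧ a < ((n + 1 : Nat) : Int)) ↔ (0 ≤ a ∧ a < (n : Int)) := by
        push_cast; omega
      rw [if_congr h2 rfl rfl]; simp [hc]

lemma pvDelta_sum (r : List Int)
    (hb : pvG0 r ≤ pvG1 r → 0 ≤ pvG0 r ∧ pvG1 r < 100000) (j : Nat) :
    ((List.range (j + 1)).map (fun t : Nat => pvDelta r (t : Int))).sum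
      = if pvG0 r ≤ (j : Int) ∧ (j : Int) ≤ pvG1 r then 1 else 0 := by
  by_cases hle : pvG0 r ≤ pvG1 r
  · obtain ⟨hl0, hlt⟩ := hb hle
    have h : ∀ t : Nat, pvDelta r (t : Int) =
        (if (t : Int) = pvG0 r then (1 : Int) else 0) -
        (if (t : Int) = pvG1 r + 1 then (1 : Int) else 0) := by
      intro t; unfold pvDelta; rw [if_pos hle]
    simp only [h]
    rw [pvSum_map_sub, pvSum_ind, pvSum_ind]
    push_cast
    split_ifs <;> omega
  · have h : ∀ t : Nat, pvDelta r (t : Int) = 0 := by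
      intro t; unfold pvDelta; rw [if_neg hle]
    simp only [h]
    rw [if_neg (by omega)]
    simp

lemma pvPartial_dlt (rs : List (List Int))
    (hpre : ∀ r ∈ rs, pvG0 r ≤ pvG1 r → 0 ≤ pvG0 r ∧ pvG1 r < 100000) (j : Nat) :
    ((List.range (j + 1)).map (fun t : Nat => pvDlt rs (t : Int))).sum = pvCnt rs (j : Int) := by
  induction rs with
  | nil => simp [pvDlt, pvCnt]
  | cons r t ih =>
    have hsplit : ∀ u : Nat, pvDlt (r :: t) (u : Int) = pvDelta r (u : Int) + pvDlt t (u : Int) := by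
      intro u; simp [pvDlt]
    simp only [hsplit]
    rw [PySem.List.sum_map_add_int, pvDelta_sum r (hpre r (by simp)) j,
      ih (fun r' hr' => hpre r' (by simp [hr'])), pvCnt_cons]
    ring

lemma pvPrefixes_length (ds : List Int) : ∀ c : Int, (pvPrefixes c ds).length = ds.length := by
  induction ds with
  | nil => intro c; rfl
  | cons d t ih => intro c; simp [pvPrefixes, ih]

lemma pvPrefixes_getD (ds : List Int) : ∀ (c : Int) (j : Nat), j < ds.length →
    (pvPrefixes c ds).getD j 0 = c + (ds.take (j + 1)).sum := by
  induction ds with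
  | nil => intro c j h; simp at h
  | cons d t ih =>
    intro c j hj
    cases j with
    | zero => simp [pvPrefixes]
    | succ j =>
      have := ih (c + d) j (by simpa using hj)
      simp only [pvPrefixes, List.getD_cons_succ, List.take_succ_cons, List.sum_cons, this]
      ring

lemma pvScan_spec (ds : List Int) : ∀ (c : Int) (acc : List Int),
    ds.foldl pvScanStep (c, acc)
      = (c + ds.sum, acc ++ (pvPrefixes c ds).filter (fun x => decide (0 < x))) := by
  induction ds with
  | nil => intro c acc; simp [pvPrefixes]
  | cons d t ih =>
    intro c acc
    simp only [List.foldl_cons, List.sum_cons, pvScanStep, pvPrefixes, List.filter_cons]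
    rw [ih]
    by_cases hc : 0 < c + d
    · simp only [hc, decide_true, if_pos]
      refine Prod.ext (by ring) (by simp)
    · simp only [hc, decide_false, Bool.false_eq_true, if_neg, not_false_eq_true]
      refine Prod.ext (by ring) (by simp)

-- ===== VERDICT (by name: the statement is the Claim_ definition above) =====
set_option maxRecDepth 40000 in
theorem maxSumRangeQuery1_spec : Claim_equal_maxSumRangeQuery1 := by
  intro nums requests _ hpre
  obtain ⟨hreq, hcard⟩ := hpre
  have hpre' : ∀ r ∈ requests, pvG0 r ≤ pvG1 r → 0 ≤ pvG0 r ∧ pvG1 r < 100000 :=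
    fun r hr => (hreq r hr).2
  unfold Spec_maxSumRangeQuery1
  simp only [maxSumRangeQuery1, maxSumRangeQuery1_alt]
  obtain ⟨hlenA, hgetA⟩ := pvFoldA_spec requests hpre' (List.replicate 100000 0) List.length_replicate
  obtain ⟨hlenB, hgetB⟩ := pvFoldB_spec requests hpre' (List.replicate 100001 0) List.length_replicate
  -- A's hist is the per-index coverage-count table
  have hA : requests.foldl pvAStep (List.replicate 100000 (0 : Int))
      = (List.range 100000).map (fun k : Nat => pvCnt requests (k : Int)) := by
    have hleq : (requests.foldl pvAStep (List.replicate 100000 (0 : Int))).length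
        = ((List.range 100000).map (fun k : Nat => pvCnt requests (k : Int))).length := by
      rw [hlenA, List.length_map, List.length_range]
    apply List.ext_getElem hleq
    intro i h1 h2
    have hi : i < 100000 := by rw [hlenA] at h1; exact h1
    rw [← List.getD_eq_getElem _ 0 h1, hgetA i hi, List.getD_replicate _ hi, zero_add,
      List.getElem_map, List.getElem_range]
  -- B's sliced diff array
  have hslice : PySem.List.slice (requests.foldl pvBStep (List.replicate 100001 (0 : Int))) none
      (some (100000 : Int)) = (requests.foldl pvBStep (List.replicate 100001 (0 : Int))).take 100000 := by
    rw [PySem.List.slice_to (xs := requests.foldl pvBStep (List.replicate 100001 (0 : Int)))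
      (b := (100000 : Int)) (by norm_num)]
    rfl
  have hlends : ((requests.foldl pvBStep (List.replicate 100001 (0 : Int))).take 100000).length
      = 100000 := by rw [List.length_take, hlenB]; omega
  have hdsget : ∀ j : Nat, j < 100000 →
      ((requests.foldl pvBStep (List.replicate 100001 (0 : Int))).take 100000).getD j 0
        = pvDlt requests (j : Int) := by
    intro j hj
    rw [pvGetD_take _ _ _ _ hj, hgetB j (by omega), List.getD_replicate _ (by omega), zero_add]
  -- B's prefix sums are the same coverage-count table
  have hprefix : pvPrefixes 0 ((requests.foldl pvBStep (List.replicate 100001 (0 : Int))).take 100000)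
      = (List.range 100000).map (fun k : Nat => pvCnt requests (k : Int)) := by
    have hleq : (pvPrefixes 0 ((requests.foldl pvBStep (List.replicate 100001 (0 : Int))).take 100000)).length
        = ((List.range 100000).map (fun k : Nat => pvCnt requests (k : Int))).length := by
      rw [pvPrefixes_length, hlends, List.length_map, List.length_range]
    apply List.ext_getElem hleq
    intro i h1 h2
    have hi : i < 100000 := by rw [pvPrefixes_length, hlends] at h1; exact h1
    rw [← List.getD_eq_getElem _ 0 h1, pvPrefixes_getD _ _ _ (by rw [hlends]; omega)]
    have htake : ((requests.foldl pvBStep (List.replicate 100001 (0 : Int))).take 100000).take (i + 1)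
        = (List.range (i + 1)).map (fun t : Nat => pvDlt requests (t : Int)) := by
      have hleq2 : (((requests.foldl pvBStep (List.replicate 100001 (0 : Int))).take 100000).take (i + 1)).length
          = ((List.range (i + 1)).map (fun t : Nat => pvDlt requests (t : Int))).length := by
        rw [List.length_take, hlends, List.length_map, List.length_range]; omega
      apply List.ext_getElem hleq2
      intro t ht1 ht2
      have ht : t < i + 1 := by simpa using ht2
      rw [← List.getD_eq_getElem _ 0 ht1, pvGetD_take _ _ _ _ ht, hdsget t (by omega),
        List.getElem_map, List.getElem_range]
    rw [htake, pvPartial_dlt requests hpre' i, zero_add, List.getElem_map, List.getElem_range]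
  rw [hA, hslice, pvScan_spec, hprefix]
  simp only [List.nil_append]
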